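-- pv_equiv track=rewrite | github.com/kdh4970/CodingTest | Programmers/LV1/대충 만든 자판.py | solution
-- ===== SOURCE A (Python) =====
-- def make(target,keymap):
--     lst=[0]*len(keymap)
--     for idx,val in enumerate(keymap):
--         for _ in range(len(val)):
--             if val[_] == target:
--                 lst[idx] += _+1
--                 break
--     return lst
--
-- def solution(keymap, targets):
--     answer = [0]*len(targets)
--     for idx,target in enumerate(targets):
--         for char in target:
--             out = make(char,keymap)
--             if list(set(out)) == [0]:
--                 answer[idx] = -1
--                 break
--             else:
--                 answer[idx] += min(x for x in out if x!=0)
--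
--
--
--     return answer
-- ===== SOURCE B (Python) =====
-- def solution(keymap, targets):
--     best = {}
--     for key in keymap:
--         for i, ch in enumerate(key):
--             if ch not in best:
--                 best[ch] = i + 1
--             elif i + 1 < best[ch]:
--                 best[ch] = i + 1
--     answer = []
--     for target in targets:
--         total = 0
--         for ch in target:
--             if ch not in best:
--                 total = -1
--                 break
--             total += best[ch]
--         answer.append(total)
--     return answer
-- ===== Notes on version B (the rewrite author's own statement) =====
-- stated objective: faster
-- what changed: Instead of rebuilding, for every character of every target, a per-key first-occurrence list via make() and scanning it for its nonzero minimum, B precomputes once a dict mapping each character to its minimum press count over all keys, then answers each target by summed lookups.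
import Mathlib
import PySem

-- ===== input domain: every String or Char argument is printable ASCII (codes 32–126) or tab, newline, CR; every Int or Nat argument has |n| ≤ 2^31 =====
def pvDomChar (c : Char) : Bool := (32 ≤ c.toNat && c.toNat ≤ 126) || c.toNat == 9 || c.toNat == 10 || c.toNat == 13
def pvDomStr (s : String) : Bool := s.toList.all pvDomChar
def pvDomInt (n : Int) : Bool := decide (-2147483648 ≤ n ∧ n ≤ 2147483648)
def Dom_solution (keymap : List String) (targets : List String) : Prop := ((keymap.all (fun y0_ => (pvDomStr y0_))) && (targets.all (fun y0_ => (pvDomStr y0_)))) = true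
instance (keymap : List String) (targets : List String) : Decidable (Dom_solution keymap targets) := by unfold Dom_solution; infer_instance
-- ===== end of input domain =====

-- B replaces A's per-target-character rebuild of make() by a single precomputed
-- char -> minimum-press dict; proved equal on Pre_ (A raises ValueError outside it).


-- ===== PORT A =====
-- inner loop of make: 'for _ in range(len(val)): if val[_] == target: lst[idx] += _+1; break'
def makeInner (target : Char) (val : List Char) (lst : List Int) (idx : Nat) : List Int → List Int
  | [] => lst
  | i :: rest =>
    match PySem.List.pyGet? val i with
    | some c => if c == target then lst.set idx (lst.getD idx 0 + (i + 1)) else makeInner target val lst idx rest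
    | none => lst   -- unreachable: i ∈ range(len(val))

def make (target : Char) (keymap : List String) : List Int :=
  (PySem.List.enumerate keymap 0).foldl
    (fun lst p => makeInner target p.2.toList lst p.1.toNat (PySem.List.pyRange 0 p.2.toList.length 1))
    (List.replicate keymap.length 0)

-- inner loop of solution over the characters of one target (with break)
def solInner (keymap : List String) (idx : Nat) (answer : List Int) : List Char → List Int
  | [] => answer
  | c :: rest =>
    let out := make c keymap
    -- 'list(set(out)) == [0]' holds exactly when set(out) = {0}; as lists of distinct
    -- elements that is the one-element list [0] in any iteration order, so the
    -- insertion-ordered PySem.Set.ofList is exact for this equality test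
    if PySem.Set.ofList out = [(0 : Int)] then answer.set idx (-1)
    else
      match PySem.List.min? (out.filter (fun x => !(x == 0))) (fun x => x) with
      | some m => solInner keymap idx (answer.set idx (answer.getD idx 0 + m)) rest
      | none => answer   -- Python: ValueError (min of empty sequence); excluded by Pre_

def solution (keymap : List String) (targets : List String) : List Int :=
  (PySem.List.enumerate targets 0).foldl
    (fun answer p => solInner keymap p.1.toNat answer p.2.toList)
    (List.replicate targets.length 0)

-- ===== PORT B =====
-- 'for i, ch in enumerate(key): if ch not in best: best[ch]=i+1 elif i+1 < best[ch]: best[ch]=i+1'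
def bestOfKey (d : PySem.Dict Char Int) (s : List Char) : PySem.Dict Char Int :=
  (PySem.List.enumerate s 0).foldl
    (fun d p =>
      if !(d.contains p.2) then d.insert p.2 (p.1 + 1)
      else if p.1 + 1 < d.getD p.2 0 then d.insert p.2 (p.1 + 1)
      else d) d

-- per-target loop: 'total = 0; for ch in target: … break'
def tgtCost (best : PySem.Dict Char Int) (total : Int) : List Char → Int
  | [] => total
  | c :: rest =>
    match best.get? c with
    | none => -1
    | some v => tgtCost best (total + v) rest

def solution_alt (keymap : List String) (targets : List String) : List Int :=
  let best := keymap.foldl (fun d key => bestOfKey d key.toList) PySem.Dict.empty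
  targets.foldl (fun ans t => ans ++ [tgtCost best 0 t.toList]) []

-- ===== PRECONDITION & SPEC =====
-- Pre_ excludes only the inputs where A raises: with keymap == [] and a nonempty
-- target, 'min(x for x in out if x != 0)' is a min() over an empty sequence (ValueError).
def Pre_solution (keymap : List String) (targets : List String) : Prop :=
  keymap = [] → ∀ t ∈ targets, t = ""
instance (keymap : List String) (targets : List String) : Decidable (Pre_solution keymap targets) := by unfold Pre_solution; infer_instance

def pvWitness_solution : List String × List String := (["abc", "bd"], ["bad", "", "xa"])

def Spec_solution (keymap : List String) (targets : List String) (out : List Int) : Prop := out = solution_alt keymap targets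
instance (keymap : List String) (targets : List String) (out : List Int) : Decidable (Spec_solution keymap targets out) := by unfold Spec_solution; infer_instance

-- ===== CLAIM (what is proved, stated in full; the proofs are below) =====
def Claim_equal_solution : Prop := ∀ (keymap : List String) (targets : List String), Dom_solution keymap targets → Pre_solution keymap targets → Spec_solution keymap targets (solution keymap targets)

-- ===== LEMMAS AND PROOFS =====


-- first-occurrence press count of c in s (None if absent)
def fv (c : Char) (s : List Char) : Option Int :=
  (s.findIdx? (fun x => x == c)).map (fun i => (i : Int) + 1)

def gval (c : Char) (s : String) : Int := (fv c s.toList).getD 0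

def omin : Option Int → Option Int → Option Int
  | none, b => b
  | some a, none => some a
  | some a, some b => some (min a b)

def tval (c : Char) (ks : List String) : Option Int :=
  ks.foldl (fun a s => omin a (fv c s.toList)) none

-- A's per-target cost, as a pure function
def pcost (ks : List String) (a : Int) : List Char → Int
  | [] => a
  | c :: rest => match tval c ks with
    | none => -1
    | some v => pcost ks (a + v) rest

-- helpers on List.set / getD
theorem set_getD_self (l : List Int) (i : Nat) : l.set i (l.getD i 0) = l := by
  induction l generalizing i with
  | nil => rfl
  | cons x t ih => cases i with
    | zero => rfl
    | succ j => simpa [List.set, List.getD] using ih j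

theorem getD_set_ne (l : List Int) (i j : Nat) (v : Int) (h : i ≠ j) :
    (l.set i v).getD j 0 = l.getD j 0 := by
  simp [List.getD_eq_getElem?_getD, List.getElem?_set_ne h]

theorem getD_set_self (l : List Int) (i : Nat) (v : Int) (h : i < l.length) :
    (l.set i v).getD i 0 = v := by
  simp [List.getD_eq_getElem?_getD, List.getElem?_set_self h]

theorem take_succ_set (l : List Int) (i : Nat) (v : Int) (h : i < l.length) :
    (l.set i v).take (i + 1) = l.take i ++ [v] := by
  rw [List.take_add_one, List.take_set]
  have : (List.take i l).set i v = List.take i l := by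
    apply List.set_eq_of_length_le
    simp
  rw [this, List.getElem?_set_self h]
  rfl

-- characterization of A's inner make-loop
theorem makeInner_eq (c : Char) (suf : List Char) : ∀ (pre : List Char) (lst : List Int) (idx : Nat),
    makeInner c (pre ++ suf) lst idx
      (PySem.List.pyRange (pre.length : Int) (((pre ++ suf).length : Nat) : Int) 1)
      = match suf.findIdx? (fun x => x == c) with
        | none => lst
        | some i => lst.set idx (lst.getD idx 0 + ((pre.length : Int) + i + 1)) := by
  induction suf with
  | nil =>
    intro pre lst idx
    rw [PySem.List.pyRange_one_eq_nil (by simp)]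
    rfl
  | cons x rest ih =>
    intro pre lst idx
    rw [PySem.List.pyRange_one_cons (by simp)]
    show (match PySem.List.pyGet? (pre ++ x :: rest) (pre.length : Int) with
      | some c' => if c' == c then lst.set idx (lst.getD idx 0 + ((pre.length : Int) + 1))
          else makeInner c (pre ++ x :: rest) lst idx
            (PySem.List.pyRange ((pre.length : Int) + 1) (((pre ++ x :: rest).length : Nat) : Int) 1)
      | none => lst) = _
    rw [PySem.List.pyGet?_append_length]
    by_cases hx : (x == c) = true
    · simp only [hx, if_pos, List.findIdx?_cons]
      rfl
    · simp only [hx, if_neg, Bool.false_eq_true, not_false_iff]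
      have h1 : ((pre.length : Int) + 1) = (((pre ++ [x]).length : Nat) : Int) := by simp
      have h2 : (pre ++ x :: rest) = (pre ++ [x]) ++ rest := by simp
      rw [List.findIdx?_cons, if_neg (by simp [hx])]
      have := ih (pre ++ [x]) lst idx
      rw [h2, h1]
      rw [this]
      cases hfi : rest.findIdx? (fun x => x == c) with
      | none => rfl
      | some i =>
        simp only []
        congr 1
        simp only [List.length_append, List.length_cons, List.length_nil, Nat.cast_add, Nat.cast_one]
        ring

theorem fv_ge_one (c : Char) (s : List Char) (v : Int) (h : fv c s = some v) : 1 ≤ v := by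
  unfold fv at h
  cases hfi : s.findIdx? (fun x => x == c) with
  | none => rw [hfi] at h; simp at h
  | some i => rw [hfi] at h; simp at h; omega

-- generic "initialize an all-zero array, then fill index idx at step idx" loop
theorem fill_foldl {α : Type} (F : List Int → Nat → α → List Int) (f : α → Int)
    (hF : ∀ (l : List Int) (i : Nat) (x : α), i < l.length → l.getD i 0 = 0 → F l i x = l.set i (f x)) :
    ∀ (xs : List α) (s0 : Nat) (lst : List Int),
    (∀ j, s0 ≤ j → lst.getD j 0 = 0) → lst.length = s0 + xs.length →
    (PySem.List.enumerate xs (s0 : Int)).foldl (fun l p => F l p.1.toNat p.2) lst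
      = lst.take s0 ++ xs.map f := by
  intro xs
  induction xs with
  | nil =>
    intro s0 lst h0 hlen
    simp at hlen
    simp [PySem.List.enumerate, List.take_of_length_le (le_of_eq hlen)]
  | cons x t ih =>
    intro s0 lst h0 hlen
    rw [PySem.List.enumerate_cons, List.foldl_cons]
    have hilt : s0 < lst.length := by simp at hlen; omega
    have hstep : F lst ((s0 : Int)).toNat x = lst.set s0 (f x) := by
      rw [Int.toNat_natCast]
      exact hF lst s0 x hilt (h0 s0 le_rfl)
    rw [hstep]
    have hcast : ((s0 : Int) + 1) = (((s0 + 1 : Nat)) : Int) := by push_cast; ring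
    rw [hcast, ih (s0 + 1) (lst.set s0 (f x))
      (fun j hj => by rw [getD_set_ne _ _ _ _ (by omega)]; exact h0 j (by omega))
      (by simp at hlen ⊢; omega)]
    rw [take_succ_set _ _ _ hilt]
    simp

-- make computes the list of per-key first-occurrence press counts
theorem make_eq (c : Char) (ks : List String) : make c ks = ks.map (gval c) := by
  unfold make
  have h := fill_foldl
    (fun l i x => makeInner c x.toList l i (PySem.List.pyRange 0 ((x.toList.length : Nat) : Int) 1))
    (gval c)
    (fun l i x hlt h0 => by
      have hm := makeInner_eq c x.toList [] l i
      simp only [List.nil_append, List.length_nil, Nat.cast_zero] at hm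
      show makeInner c x.toList l i (PySem.List.pyRange 0 ((x.toList.length : Nat) : Int) 1) = l.set i (gval c x)
      rw [hm]
      unfold gval fv
      cases hfi : x.toList.findIdx? (fun y => y == c) with
      | none =>
        have hset : l.set i (l.getD i 0) = l := set_getD_self l i
        rw [h0] at hset
        simp [hset]
      | some i0 =>
        have h0' : l[i]?.getD 0 = 0 := by rw [← List.getD_eq_getElem?_getD]; exact h0
        simp [h0'])
    ks 0 (List.replicate ks.length 0)
    (fun j _ => by
      rcases lt_or_ge j ks.length with hj | hj
      · simp [List.getD_replicate _ hj]
      · simp [List.getD_eq_getElem?_getD, List.getElem?_eq_none (by simpa using hj)])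
    (by simp)
  simpa using h

-- 'list(set(out)) == [0]' test characterized
theorem ofList_eq_zero_iff (out : List Int) :
    PySem.Set.ofList out = [(0 : Int)] ↔ (out ≠ [] ∧ ∀ x ∈ out, x = 0) := by
  constructor
  · intro h
    constructor
    · rintro rfl; simp [PySem.Set.ofList] at h
    · intro x hx
      have : x ∈ PySem.Set.ofList out := (PySem.Set.mem_ofList out x).mpr hx
      rw [h] at this; simpa using this
  · rintro ⟨hne, hall⟩
    have aux : ∀ (l : List Int), (∀ x ∈ l, x = 0) → l.foldl PySem.Set.add [(0 : Int)] = [0] := by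
      intro l
      induction l with
      | nil => intro _; rfl
      | cons y t iht =>
        intro hy
        have : y = 0 := hy y (List.mem_cons_self)
        subst this
        rw [List.foldl_cons, show PySem.Set.add [(0:Int)] 0 = [0] by rfl]
        exact iht (fun x hx => hy x (List.mem_cons_of_mem _ hx))
    cases out with
    | nil => exact absurd rfl hne
    | cons y t =>
      have hy : y = 0 := hall y (List.mem_cons_self)
      subst hy
      rw [PySem.Set.ofList_eq_foldl, List.foldl_cons,
        show PySem.Set.add [] (0:Int) = [0] by rfl]
      exact aux t (fun x hx => hall x (List.mem_cons_of_mem _ hx))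

-- ===== B-side dict characterization =====
def bstep (d : PySem.Dict Char Int) (p : Int × Char) : PySem.Dict Char Int :=
  if !(d.contains p.2) then d.insert p.2 (p.1 + 1)
  else if p.1 + 1 < d.getD p.2 0 then d.insert p.2 (p.1 + 1)
  else d

-- minimum over all occurrences of c in s, indices starting at s0
def hitMin (c : Char) : List Char → Int → Option Int
  | [], _ => none
  | x :: xs, s0 => if x == c then omin (some (s0 + 1)) (hitMin c xs (s0 + 1)) else hitMin c xs (s0 + 1)

theorem omin_assoc (a b c : Option Int) : omin (omin a b) c = omin a (omin b c) := by
  cases a <;> cases b <;> cases c <;> simp [omin, min_assoc]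

theorem bestOfKey_get? (c : Char) (s : List Char) : ∀ (s0 : Int) (d : PySem.Dict Char Int),
    ((PySem.List.enumerate s s0).foldl bstep d).get? c = omin (d.get? c) (hitMin c s s0) := by
  induction s with
  | nil => intro s0 d; cases h : d.get? c <;> simp [PySem.List.enumerate, hitMin, omin, h]
  | cons x xs ih =>
    intro s0 d
    rw [PySem.List.enumerate_cons, List.foldl_cons, ih]
    by_cases hx : x = c
    · subst hx
      have hd : (bstep d (s0, x)).get? x = omin (d.get? x) (some (s0 + 1)) := by
        unfold bstep
        simp only []
        cases hc : d.contains x with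
        | false =>
          have : d.get? x = none := (PySem.Dict.get?_eq_none_iff_contains d x).mpr hc
          simp [hc, PySem.Dict.get?_insert_self, this, omin]
        | true =>
          have hsome : (d.get? x).isSome := by
            cases hg : d.get? x
            · rw [(PySem.Dict.get?_eq_none_iff_contains d x).mp hg] at hc; simp at hc
            · rfl
          obtain ⟨cur, hcur⟩ := Option.isSome_iff_exists.mp hsome
          have hgd : d.getD x 0 = cur := by rw [PySem.Dict.getD_eq_get?_getD, hcur]; rfl
          by_cases hlt : s0 + 1 < cur
          · have hmin : min cur (s0 + 1) = s0 + 1 := min_eq_right (le_of_lt hlt)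
            simp [hc, hgd, hlt, PySem.Dict.get?_insert_self, hcur, omin, hmin]
          · have hmin : min cur (s0 + 1) = cur := min_eq_left (by omega)
            simp [hc, hgd, hlt, hcur, omin, hmin]
      rw [hd, hitMin, if_pos (by simp), ← omin_assoc]
    · have hd : (bstep d (s0, x)).get? c = d.get? c := by
        unfold bstep
        simp only []
        split
        · exact PySem.Dict.get?_insert_of_ne d _ (Ne.symm hx)
        · split
          · exact PySem.Dict.get?_insert_of_ne d _ (Ne.symm hx)
          · rfl
      rw [hd, hitMin, if_neg (by simp [hx])]

theorem hitMin_ge (c : Char) (s : List Char) : ∀ (s0 v : Int), hitMin c s s0 = some v → s0 + 1 ≤ v := by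
  induction s with
  | nil => intro s0 v h; simp [hitMin] at h
  | cons x xs ih =>
    intro s0 v h
    unfold hitMin at h
    split at h
    · cases hr : hitMin c xs (s0 + 1) with
      | none => rw [hr] at h; simp [omin] at h; omega
      | some w =>
        rw [hr] at h
        have := ih (s0 + 1) w hr
        simp [omin] at h
        omega
    · have := ih (s0 + 1) v h
      omega

theorem hitMin_eq_fv (c : Char) (s : List Char) : ∀ (s0 : Int),
    hitMin c s s0 = (fv c s).map (fun v => s0 + v) := by
  induction s with
  | nil => intro s0; simp [hitMin, fv]
  | cons x xs ih =>
    intro s0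
    unfold hitMin fv
    rw [List.findIdx?_cons]
    by_cases hx : (x == c) = true
    · rw [if_pos hx, if_pos hx]
      cases hr : hitMin c xs (s0 + 1) with
      | none => simp [omin]
      | some w =>
        have h1 := hitMin_ge c xs (s0 + 1) w hr
        have hmin : min (s0 + 1) w = s0 + 1 := min_eq_left (by omega)
        simp [omin, hmin]
    · rw [if_neg hx, if_neg hx, ih (s0 + 1)]
      unfold fv
      cases hfi : xs.findIdx? (fun y => y == c) with
      | none => simp
      | some i => simp; push_cast; ring

theorem best_get? (ks : List String) (c : Char) :
    (ks.foldl (fun d key => bestOfKey d key.toList) PySem.Dict.empty).get? c = tval c ks := by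
  have gen : ∀ (l : List String) (d : PySem.Dict Char Int),
      (l.foldl (fun d key => bestOfKey d key.toList) d).get? c
        = l.foldl (fun a s => omin a (fv c s.toList)) (d.get? c) := by
    intro l
    induction l with
    | nil => intro d; rfl
    | cons s t ih =>
      intro d
      rw [List.foldl_cons, List.foldl_cons, ih]
      congr 1
      show ((PySem.List.enumerate s.toList 0).foldl _ d).get? c = _
      have : (fun (d : PySem.Dict Char Int) (p : Int × Char) =>
          if !(d.contains p.2) then d.insert p.2 (p.1 + 1)
          else if p.1 + 1 < d.getD p.2 0 then d.insert p.2 (p.1 + 1)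
          else d) = bstep := rfl
      rw [this, bestOfKey_get? c s.toList 0 d, hitMin_eq_fv]
      cases fv c s.toList <;> simp [omin]
  rw [gen ks PySem.Dict.empty]
  rfl

-- ===== folding omin = Python min over the non-None values =====
theorem foldl_omin_some (l : List (Option Int)) : ∀ (x : Int),
    l.foldl omin (some x) = some ((l.filterMap id).foldl min x) := by
  induction l with
  | nil => intro x; rfl
  | cons o t ih =>
    intro x
    cases o with
    | none => simpa [omin] using ih x
    | some y => simpa [omin] using ih (min x y)

theorem foldl_omin_none (l : List (Option Int)) :
    l.foldl omin none = match l.filterMap id with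
      | [] => none
      | x :: t => some (t.foldl min x) := by
  induction l with
  | nil => rfl
  | cons o t ih =>
    cases o with
    | none => simpa [omin] using ih
    | some y => simp [omin, foldl_omin_some]

theorem tval_eq_match (c : Char) (ks : List String) :
    tval c ks = match ks.filterMap (fun s => fv c s.toList) with
      | [] => none
      | x :: t => some (t.foldl min x) := by
  unfold tval
  have h1 : ks.foldl (fun a s => omin a (fv c s.toList)) none
      = (ks.map (fun s => fv c s.toList)).foldl omin none := by
    rw [List.foldl_map]
  rw [h1, foldl_omin_none, List.filterMap_map]
  rfl

theorem filter_map_gval (c : Char) (ks : List String) :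
    (ks.map (gval c)).filter (fun x => !(x == 0)) = ks.filterMap (fun s => fv c s.toList) := by
  induction ks with
  | nil => rfl
  | cons s t ih =>
    rw [List.map_cons, List.filter_cons, List.filterMap_cons]
    cases hfv : fv c s.toList with
    | none => simp [gval, hfv, ih]
    | some v =>
      have := fv_ge_one c s.toList v hfv
      have hz : (!((gval c s) == (0:Int))) = true := by
        simp [gval, hfv]; omega
      rw [if_pos hz, ih]
      simp [gval, hfv]

theorem min?_eq_tval (c : Char) (ks : List String) :
    PySem.List.min? ((ks.map (gval c)).filter (fun x => !(x == 0))) (fun x => x) = tval c ks := by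
  rw [filter_map_gval, tval_eq_match]
  cases h : ks.filterMap (fun s => fv c s.toList) with
  | nil => rfl
  | cons x t => rw [PySem.List.min?_id_cons]

theorem tval_none_iff (c : Char) (ks : List String) :
    tval c ks = none ↔ ∀ s ∈ ks, fv c s.toList = none := by
  rw [tval_eq_match]
  cases h : ks.filterMap (fun s => fv c s.toList) with
  | nil => simpa using List.filterMap_eq_nil_iff.mp h
  | cons x t =>
    simp only []
    constructor
    · intro hc; exact absurd hc (by simp)
    · intro hall
      have : ks.filterMap (fun s => fv c s.toList) = [] := List.filterMap_eq_nil_iff.mpr hall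
      rw [h] at this; simp at this

-- A's inner per-target loop computes pcost
theorem solInner_eq (ks : List String) (hks : ks ≠ []) (chars : List Char) :
    ∀ (answer : List Int) (idx : Nat), idx < answer.length →
    solInner ks idx answer chars = answer.set idx (pcost ks (answer.getD idx 0) chars) := by
  induction chars with
  | nil =>
    intro answer idx _
    rw [show pcost ks (answer.getD idx 0) [] = answer.getD idx 0 from rfl, set_getD_self]
    rfl
  | cons c rest ih =>
    intro answer idx hlt
    rw [show solInner ks idx answer (c :: rest) =
      (if PySem.Set.ofList (make c ks) = [(0 : Int)] then answer.set idx (-1)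
      else match PySem.List.min? ((make c ks).filter (fun x => !(x == 0))) (fun x => x) with
        | some m => solInner ks idx (answer.set idx (answer.getD idx 0 + m)) rest
        | none => answer) from rfl]
    rw [make_eq, min?_eq_tval]
    cases htv : tval c ks with
    | none =>
      rw [if_pos]
      · rw [show pcost ks (answer.getD idx 0) (c :: rest)
          = (match tval c ks with | none => (-1 : Int) | some v => pcost ks (answer.getD idx 0 + v) rest) from rfl, htv]
      · rw [ofList_eq_zero_iff]
        refine ⟨by simpa using hks, ?_⟩
        intro x hx
        obtain ⟨s, hs, rfl⟩ := List.mem_map.mp hx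
        have := (tval_none_iff c ks).mp htv s hs
        simp [gval, this]
    | some v =>
      rw [if_neg]
      · show solInner ks idx (answer.set idx (answer.getD idx 0 + v)) rest = _
        rw [ih (answer.set idx (answer.getD idx 0 + v)) idx (by simpa using hlt),
          getD_set_self _ _ _ hlt, List.set_set]
        rw [show pcost ks (answer.getD idx 0) (c :: rest)
          = (match tval c ks with | none => (-1 : Int) | some v => pcost ks (answer.getD idx 0 + v) rest) from rfl, htv]
      · rw [ofList_eq_zero_iff]
        rintro ⟨-, hall⟩
        have : ∀ s ∈ ks, fv c s.toList = none := by
          intro s hs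
          have h0 : gval c s = 0 := hall _ (List.mem_map_of_mem hs)
          cases hf : fv c s.toList with
          | none => rfl
          | some w =>
            have := fv_ge_one c s.toList w hf
            simp [gval, hf] at h0
            omega
        rw [(tval_none_iff c ks).mpr this] at htv
        simp at htv

-- B's per-target loop computes pcost too
theorem tgtCost_eq_pcost (ks : List String) (best : PySem.Dict Char Int)
    (hb : ∀ c, best.get? c = tval c ks) (chars : List Char) :
    ∀ (a : Int), tgtCost best a chars = pcost ks a chars := by
  induction chars with
  | nil => intro a; rfl
  | cons c rest ih =>
    intro a
    rw [show tgtCost best a (c :: rest)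
      = (match best.get? c with | none => (-1:Int) | some v => tgtCost best (a + v) rest) from rfl, hb c]
    rw [show pcost ks a (c :: rest)
      = (match tval c ks with | none => (-1:Int) | some v => pcost ks (a + v) rest) from rfl]
    cases tval c ks with
    | none => rfl
    | some v => exact ih (a + v)

-- ===== VERDICT (by name: the statement is the Claim_ definition above) =====
theorem solution_spec : Claim_equal_solution := by
  intro km tg _ pre
  unfold Spec_solution solution solution_alt
  rw [PySem.List.foldl_append_singleton_eq_map, List.nil_append]
  by_cases hk : km = []
  · subst hk
    rw [PySem.List.foldl_congr_mem _ _ (fun l _ => l) _ (by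
      intro acc p hp
      obtain ⟨k, hklt, rfl⟩ := (PySem.List.mem_enumerate_iff tg 0 p).mp hp
      have : tg[k] = "" := pre rfl _ (List.getElem_mem hklt)
      simp [this]
      rfl), PySem.List.foldl_ignore]
    rw [List.map_congr_left (g := fun _ => (0 : Int)) (by
      intro t ht
      have : t = "" := pre rfl t ht
      simp [this]
      rfl)]
    simp [List.map_const', List.eq_replicate_iff]
  · have hmap := fill_foldl (fun l i x => solInner km i l x.toList) (fun x => pcost km 0 x.toList)
      (fun l i x hlt h0 => by
        show solInner km i l x.toList = l.set i (pcost km 0 x.toList)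
        rw [solInner_eq km hk x.toList l i hlt, h0])
      tg 0 (List.replicate tg.length 0)
      (fun j _ => by
        rcases lt_or_ge j tg.length with hj | hj
        · simp [List.getD_replicate _ hj]
        · simp [List.getD_eq_getElem?_getD, List.getElem?_eq_none (by simpa using hj)])
      (by simp)
    simp only [Nat.cast_zero, List.take_zero, List.nil_append] at hmap
    rw [hmap]
    exact List.map_congr_left (fun t _ =>
      (tgtCost_eq_pcost km _ (fun c => best_get? km c) t.toList 0).symm)
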